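-- pv_equiv track=rewrite | github.com/starheim/AdventOfCode2020 | Day5/Part2.py | findRow
-- ===== SOURCE A (Python) =====
-- def findRow(min, max, reference):
--     if(len(reference)== 1):
--         if(reference == 'F'):
--             return min
--         else:
--             return max
--     middle = (max + 1  - min) // 2 + min
--     if reference[0] == 'F':
--         return findRow(min, middle -1, reference[1:])
--     else:
--         return findRow(middle, max, reference[1:])
-- ===== SOURCE B (Python) =====
-- def findRow(min, max, reference):
--     lo, hi = min, max
--     for c in reference[:-1]:
--         mid = (hi + 1 - lo) // 2 + lo
--         if c == 'F':
--             hi = mid - 1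
--         else:
--             lo = mid
--     return lo if reference[-1] == 'F' else hi
-- ===== Notes on version B (the rewrite author's own statement) =====
-- stated objective: faster
-- what changed: Replaces A's recursion with string slicing at each step by a single iterative pass that shrinks a (lo, hi) window over reference[:-1] and picks the endpoint from the last character.
import Mathlib
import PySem

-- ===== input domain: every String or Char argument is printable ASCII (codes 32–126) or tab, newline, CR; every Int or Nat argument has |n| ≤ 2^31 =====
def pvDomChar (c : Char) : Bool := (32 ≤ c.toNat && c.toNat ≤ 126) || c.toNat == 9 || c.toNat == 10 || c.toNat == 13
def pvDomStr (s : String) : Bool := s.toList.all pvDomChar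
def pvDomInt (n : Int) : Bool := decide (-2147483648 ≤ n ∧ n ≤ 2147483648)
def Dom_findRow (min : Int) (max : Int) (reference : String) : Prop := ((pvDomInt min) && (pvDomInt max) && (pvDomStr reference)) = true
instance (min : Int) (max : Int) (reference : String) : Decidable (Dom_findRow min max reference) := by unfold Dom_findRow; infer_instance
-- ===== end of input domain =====

-- B replaces A's slicing recursion with one iterative pass over a shrinking (lo, hi) window (alternative decomposition, same result).
-- ===== PORT A =====
-- recursion over the character list of `reference`, step for step as in A
def findRowA (min : Int) (max : Int) (ref : List Char) : Int :=
  if ref.length == 1 then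
    if ref == ['F'] then min else max
  else
    let middle := PySem.Int.floordiv (max + 1 - min) 2 + min
    match ref with
    | [] => 0  -- Python raises IndexError here (reference[0] on empty); excluded by Pre_findRow
    | c :: rest =>
      if c == 'F' then findRowA min (middle - 1) rest
      else findRowA middle max rest

def findRow (min : Int) (max : Int) (reference : String) : Int :=
  findRowA min max reference.toList

-- ===== PORT B =====
-- loop body of B: shrink the (lo, hi) window by one character
def stepB (p : Int × Int) (c : Char) : Int × Int :=
  let mid := PySem.Int.floordiv (p.2 + 1 - p.1) 2 + p.1
  if c == 'F' then (p.1, mid - 1) else (mid, p.2)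

def findRow_alt (min : Int) (max : Int) (reference : String) : Int :=
  let cs := reference.toList
  let p := (cs.dropLast).foldl stepB (min, max)   -- for c in reference[:-1]
  match cs.getLast? with                          -- reference[-1]; none = IndexError, excluded by Pre_findRow
  | some c => if c == 'F' then p.1 else p.2
  | none => 0

-- ===== PRECONDITION & SPEC =====
-- Pre_ excludes only the empty string, on which Python A raises IndexError (reference[0]).
def Pre_findRow (min : Int) (max : Int) (reference : String) : Prop := reference.toList ≠ []
instance (min : Int) (max : Int) (reference : String) : Decidable (Pre_findRow min max reference) := by unfold Pre_findRow; infer_instance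
def pvWitness_findRow : Int × Int × String := (0, 127, "FBFBBFF")

def Spec_findRow (min : Int) (max : Int) (reference : String) (out : Int) : Prop := out = findRow_alt min max reference
instance (min : Int) (max : Int) (reference : String) (out : Int) : Decidable (Spec_findRow min max reference out) := by unfold Spec_findRow; infer_instance

-- ===== CLAIM (what is proved, stated in full; the proofs are below) =====
def Claim_equal_findRow : Prop := ∀ (min : Int) (max : Int) (reference : String), Dom_findRow min max reference → Pre_findRow min max reference → Spec_findRow min max reference (findRow min max reference)

-- ===== LEMMAS AND PROOFS =====
theorem findRowA_concat (l : List Char) (c : Char) :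
    ∀ (mn mx : Int), findRowA mn mx (l ++ [c]) =
      (if c == 'F' then (l.foldl stepB (mn, mx)).1 else (l.foldl stepB (mn, mx)).2) := by
  induction l with
  | nil =>
    intro mn mx
    simp [findRowA]
  | cons a l ih =>
    intro mn mx
    have hlen : (a :: (l ++ [c])).length ≠ 1 := by simp
    rw [List.cons_append, findRowA]
    simp only [hlen, beq_iff_eq]
    by_cases h : a = 'F' <;> simp [h, ih, stepB]

theorem findRow_spec : Claim_equal_findRow := by
  intro mn mx reference _ hpre
  unfold Spec_findRow findRow findRow_alt
  rcases (reference.toList).eq_nil_or_concat with h | ⟨l, c, h⟩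
  · exact absurd h hpre
  · rw [h]
    simp only [List.concat_eq_append, List.dropLast_concat, List.getLast?_concat]
    rw [findRowA_concat]
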